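-- pv_equiv track=rewrite | github.com/Egor88888888/reimagined-fiesta | app/ml/trainer.py | _align_strings
-- ===== SOURCE A (Python) =====
-- def _align_strings(
--
--     s1: str,
--     s2: str,
-- ) -> list[tuple[str, str]]:
--     """Align two strings character by character using edit distance.
--
--     Returns list of (original_char, corrected_char) pairs.
--     Insertions/deletions use empty string.
--     """
--     m, n = len(s1), len(s2)
--
--     # Simple case: same length
--     if m == n:
--         return list(zip(s1, s2))
--
--     # DP alignment
--     dp = [[0] * (n + 1) for _ in range(m + 1)]
--     for i in range(m + 1):
--         dp[i][0] = i
--     for j in range(n + 1):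
--         dp[0][j] = j
--
--     for i in range(1, m + 1):
--         for j in range(1, n + 1):
--             if s1[i - 1] == s2[j - 1]:
--                 dp[i][j] = dp[i - 1][j - 1]
--             else:
--                 dp[i][j] = 1 + min(
--                     dp[i - 1][j],      # deletion
--                     dp[i][j - 1],      # insertion
--                     dp[i - 1][j - 1],  # substitution
--                 )
--
--     # Backtrack to get alignment
--     aligned = []
--     i, j = m, n
--     while i > 0 or j > 0:
--         if i > 0 and j > 0 and (
--             s1[i - 1] == s2[j - 1] or
--             dp[i][j] == dp[i - 1][j - 1] + 1
--         ):
--             aligned.append((s1[i - 1], s2[j - 1]))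
--             i -= 1
--             j -= 1
--         elif i > 0 and dp[i][j] == dp[i - 1][j] + 1:
--             aligned.append((s1[i - 1], ""))
--             i -= 1
--         else:
--             aligned.append(("", s2[j - 1]))
--             j -= 1
--
--     aligned.reverse()
--     # Filter out empty pairs for substitution matrix
--     return [(a, b) for a, b in aligned if a and b]
-- ===== SOURCE B (Python) =====
-- def _align_strings(
--
--     s1: str,
--     s2: str,
-- ) -> list[tuple[str, str]]:
--     """Align two strings character by character using edit distance.
--
--     Returns list of (original_char, corrected_char) pairs.
--     Insertions/deletions use empty string.
--     """
--     m, n = len(s1), len(s2)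
--
--     # Simple case: same length
--     if m == n:
--         return list(zip(s1, s2))
--
--     # Forward DP with rolling rows; record a pointer per cell while filling.
--     prev = list(range(n + 1))
--     ptr = [['L'] * (n + 1) for _ in range(m + 1)]
--     for i in range(1, m + 1):
--         prow = ptr[i]
--         prow[0] = 'U'
--         cur = [i] + [0] * n
--         for j in range(1, n + 1):
--             if s1[i - 1] == s2[j - 1]:
--                 cur[j] = prev[j - 1]
--                 prow[j] = 'D'
--             else:
--                 v = 1 + min(prev[j], cur[j - 1], prev[j - 1])
--                 cur[j] = v
--                 if v == prev[j - 1] + 1: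
--                     prow[j] = 'D'
--                 elif v == prev[j] + 1:
--                     prow[j] = 'U'
--                 else:
--                     prow[j] = 'L'
--         prev = cur
--
--     # Follow the pointers; emit only matched/substituted pairs, so no
--     # post-filtering is needed.
--     out = []
--     i, j = m, n
--     while i > 0 or j > 0:
--         mv = ptr[i][j]
--         if mv == 'D':
--             out.append((s1[i - 1], s2[j - 1]))
--             i -= 1
--             j -= 1
--         elif mv == 'U':
--             i -= 1
--         else:
--             j -= 1
--     out.reverse()
--     return out
-- ===== Notes on version B (the rewrite author's own statement) =====
-- stated objective: alternative
-- what changed: Instead of A's full dp table plus a condition-re-testing backtrack that is reversed and then filtered, B records a move pointer per cell during a rolling-two-row forward fill and reconstructs by following the stored pointers, emitting only matched/substituted pairs so no post-filter is needed.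
import Mathlib
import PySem

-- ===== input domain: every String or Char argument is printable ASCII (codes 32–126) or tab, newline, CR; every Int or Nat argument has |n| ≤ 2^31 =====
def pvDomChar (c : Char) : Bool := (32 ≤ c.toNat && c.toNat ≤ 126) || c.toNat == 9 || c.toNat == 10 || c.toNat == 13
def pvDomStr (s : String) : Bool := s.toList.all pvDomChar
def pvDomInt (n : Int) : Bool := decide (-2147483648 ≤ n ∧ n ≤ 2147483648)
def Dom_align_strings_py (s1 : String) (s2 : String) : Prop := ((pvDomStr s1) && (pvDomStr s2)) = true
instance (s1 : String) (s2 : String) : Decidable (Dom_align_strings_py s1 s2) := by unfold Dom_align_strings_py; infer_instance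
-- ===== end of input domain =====

-- B replaces A's full-table backtracking (reverse + filter) by a pointer matrix built during a
-- rolling-two-row forward fill, followed by a pointer walk that emits only matched/substituted
-- pairs directly; objective: alternative (same asymptotic cost, different algorithmic bookkeeping).

-- ===== PORT A =====
-- dp cell read/write on the list-of-lists table (Python dp[i][j]; indices are in range wherever used)
def pvCell (dp : List (List Nat)) (i j : Nat) : Nat := (dp.getD i []).getD j 0

def pvSetCell (dp : List (List Nat)) (i j v : Nat) : List (List Nat) :=
  dp.set i ((dp.getD i []).set j v)

-- the DP table exactly as A fills it (zeros, two border loops, nested fill loops)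
def pvDpA (l1 l2 : List Char) : List (List Nat) :=
  let m := l1.length
  let n := l2.length
  let dp0 := List.replicate (m+1) (List.replicate (n+1) 0)
  let dp1 := (List.range (m+1)).foldl (fun dp i => pvSetCell dp i 0 i) dp0
  let dp2 := (List.range (n+1)).foldl (fun dp j => pvSetCell dp 0 j j) dp1
  (List.range' 1 m).foldl (fun dp i =>
    (List.range' 1 n).foldl (fun dp j =>
      if l1.getD (i-1) ' ' = l2.getD (j-1) ' ' then
        pvSetCell dp i j (pvCell dp (i-1) (j-1))
      else
        pvSetCell dp i j (1 + min (min (pvCell dp (i-1) j) (pvCell dp i (j-1))) (pvCell dp (i-1) (j-1)))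
    ) dp) dp2

-- A's while-loop backtrack; fuel bounds the iteration count (the loop takes at most m+n steps)
def pvBtA (l1 l2 : List Char) (dp : List (List Nat)) :
    Nat → Nat → Nat → List (String × String) → List (String × String)
  | 0, _, _, acc => acc
  | fuel+1, i, j, acc =>
    if i > 0 ∨ j > 0 then
      if i > 0 ∧ j > 0 ∧ (l1.getD (i-1) ' ' = l2.getD (j-1) ' ' ∨ pvCell dp i j = pvCell dp (i-1) (j-1) + 1) then
        pvBtA l1 l2 dp fuel (i-1) (j-1) (acc ++ [(String.ofList [l1.getD (i-1) ' '], String.ofList [l2.getD (j-1) ' '])])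
      else if i > 0 ∧ pvCell dp i j = pvCell dp (i-1) j + 1 then
        pvBtA l1 l2 dp fuel (i-1) j (acc ++ [(String.ofList [l1.getD (i-1) ' '], "")])
      else
        pvBtA l1 l2 dp fuel i (j-1) (acc ++ [("", String.ofList [l2.getD (j-1) ' '])])
    else acc

def align_strings_py (s1 : String) (s2 : String) : List (String × String) :=
  let l1 := s1.toList
  let l2 := s2.toList
  let m := l1.length
  let n := l2.length
  if m = n then
    (l1.zip l2).map (fun p => (String.ofList [p.1], String.ofList [p.2]))
  else
    let dp := pvDpA l1 l2
    let aligned := pvBtA l1 l2 dp (m+n) m n []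
    aligned.reverse.filter (fun p => decide (p.1 ≠ "" ∧ p.2 ≠ ""))

-- ===== PORT B =====
-- forward fill with rolling rows (prev/cur) recording a move pointer per cell; returns (last row, ptr)
def pvFillB (l1 l2 : List Char) : List Nat × List (List Char) :=
  let m := l1.length
  let n := l2.length
  let prev0 := List.range (n+1)
  let ptr0 := List.replicate (m+1) (List.replicate (n+1) 'L')
  (List.range' 1 m).foldl (fun (st : List Nat × List (List Char)) i =>
    let prev := st.1
    let ptr := st.2
    let prow0 := (ptr.getD i []).set 0 'U'
    let cur0 := i :: List.replicate n 0
    let inner := (List.range' 1 n).foldl (fun (cp : List Nat × List Char) j =>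
        let cur := cp.1
        let prow := cp.2
        if l1.getD (i-1) ' ' = l2.getD (j-1) ' ' then
          (cur.set j (prev.getD (j-1) 0), prow.set j 'D')
        else
          let v := 1 + min (min (prev.getD j 0) (cur.getD (j-1) 0)) (prev.getD (j-1) 0)
          let prow' := if v = prev.getD (j-1) 0 + 1 then prow.set j 'D'
                       else if v = prev.getD j 0 + 1 then prow.set j 'U'
                       else prow.set j 'L'
          (cur.set j v, prow')
      ) (cur0, prow0)
    (inner.1, ptr.set i inner.2)) (prev0, ptr0)

-- pointer walk from (m,n): emit a pair only on a diagonal move, so no post-filter is needed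
def pvWalkB (l1 l2 : List Char) (ptr : List (List Char)) :
    Nat → Nat → Nat → List (String × String) → List (String × String)
  | 0, _, _, acc => acc
  | fuel+1, i, j, acc =>
    if i > 0 ∨ j > 0 then
      let mv := (ptr.getD i []).getD j 'L'
      if mv = 'D' then
        pvWalkB l1 l2 ptr fuel (i-1) (j-1) (acc ++ [(String.ofList [l1.getD (i-1) ' '], String.ofList [l2.getD (j-1) ' '])])
      else if mv = 'U' then
        pvWalkB l1 l2 ptr fuel (i-1) j acc
      else
        pvWalkB l1 l2 ptr fuel i (j-1) acc
    else acc

def align_strings_py_alt (s1 : String) (s2 : String) : List (String × String) :=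
  let l1 := s1.toList
  let l2 := s2.toList
  let m := l1.length
  let n := l2.length
  if m = n then
    (l1.zip l2).map (fun p => (String.ofList [p.1], String.ofList [p.2]))
  else
    let st := pvFillB l1 l2
    (pvWalkB l1 l2 st.2 (m+n) m n []).reverse

-- ===== PRECONDITION & SPEC =====
def Spec_align_strings_py (s1 : String) (s2 : String) (out : List (String × String)) : Prop := out = align_strings_py_alt s1 s2
instance (s1 : String) (s2 : String) (out : List (String × String)) : Decidable (Spec_align_strings_py s1 s2 out) := by unfold Spec_align_strings_py; infer_instance

-- ===== CLAIM (what is proved, stated in full; the proofs are below) =====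
def Claim_equal_align_strings_py : Prop := ∀ (s1 : String) (s2 : String), Dom_align_strings_py s1 s2 → Spec_align_strings_py s1 s2 (align_strings_py s1 s2)

-- ===== LEMMAS AND PROOFS =====

-- the mathematical edit-distance recurrence both fills compute
def pvD (l1 l2 : List Char) : Nat → Nat → Nat
  | 0, j => j
  | i+1, 0 => i+1
  | i+1, j+1 =>
    if l1.getD i ' ' = l2.getD j ' ' then pvD l1 l2 i j
    else 1 + min (min (pvD l1 l2 i (j+1)) (pvD l1 l2 (i+1) j)) (pvD l1 l2 i j)
  termination_by i j => (i, j)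

-- A's backtrack emission sequence (head = first pair appended, i.e. the one nearest (m,n))
def pvTrace (l1 l2 : List Char) : Nat → Nat → List (String × String)
  | 0, 0 => []
  | i+1, 0 => (String.ofList [l1.getD i ' '], "") :: pvTrace l1 l2 i 0
  | 0, j+1 => ("", String.ofList [l2.getD j ' ']) :: pvTrace l1 l2 0 j
  | i+1, j+1 =>
    if l1.getD i ' ' = l2.getD j ' ' ∨ pvD l1 l2 (i+1) (j+1) = pvD l1 l2 i j + 1 then
      (String.ofList [l1.getD i ' '], String.ofList [l2.getD j ' ']) :: pvTrace l1 l2 i j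
    else if pvD l1 l2 (i+1) (j+1) = pvD l1 l2 i (j+1) + 1 then
      (String.ofList [l1.getD i ' '], "") :: pvTrace l1 l2 i (j+1)
    else
      ("", String.ofList [l2.getD j ' ']) :: pvTrace l1 l2 (i+1) j
  termination_by i j => (i, j)

-- the move B's fill records at each cell
def pvMove (l1 l2 : List Char) : Nat → Nat → Char
  | _, 0 => 'U'
  | 0, _+1 => 'L'
  | i+1, j+1 =>
    if l1.getD i ' ' = l2.getD j ' ' then 'D'
    else if pvD l1 l2 (i+1) (j+1) = pvD l1 l2 i j + 1 then 'D'
    else if pvD l1 l2 (i+1) (j+1) = pvD l1 l2 i (j+1) + 1 then 'U'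
    else 'L'

-- --- generic list get/set helpers ---

theorem pvGetD_set_self {α : Type} (l : List α) (i : Nat) (v d : α) (h : i < l.length) :
    (l.set i v).getD i d = v := by
  simp [List.getD_eq_getElem?_getD, h]

theorem pvGetD_set_ne {α : Type} (l : List α) (i j : Nat) (v d : α) (h : i ≠ j) :
    (l.set i v).getD j d = l.getD j d := by
  simp [List.getD_eq_getElem?_getD, h]

theorem pvGetD_replicate {α : Type} (k j : Nat) (x d : α) (h : j < k) :
    (List.replicate k x).getD j d = x := by
  simp [List.getD_eq_getElem?_getD, h]

theorem pvGetD_range (k j : Nat) (h : j < k) : (List.range k).getD j 0 = j := by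
  simp [List.getD_eq_getElem?_getD, h]

-- --- cell/set lemmas for A's table ---

theorem pvLen_setCell (dp : List (List Nat)) (i j v : Nat) :
    (pvSetCell dp i j v).length = dp.length := by
  simp [pvSetCell]

theorem pvRowLen_setCell (dp : List (List Nat)) (i j v r : Nat) :
    ((pvSetCell dp i j v).getD r []).length = (dp.getD r []).length := by
  unfold pvSetCell
  by_cases h : i = r
  · subst h
    by_cases hl : i < dp.length
    · rw [pvGetD_set_self _ _ _ _ hl]; simp
    · rw [List.set_eq_of_length_le (by omega)]
  · rw [pvGetD_set_ne _ _ _ _ _ h]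

theorem pvCell_set_self (dp : List (List Nat)) (i j v : Nat)
    (h1 : i < dp.length) (h2 : j < (dp.getD i []).length) :
    pvCell (pvSetCell dp i j v) i j = v := by
  unfold pvCell pvSetCell
  rw [pvGetD_set_self _ _ _ _ h1, pvGetD_set_self _ _ _ _ h2]

theorem pvCell_set_ne (dp : List (List Nat)) (i j v i' j' : Nat)
    (h : i ≠ i' ∨ j ≠ j') :
    pvCell (pvSetCell dp i j v) i' j' = pvCell dp i' j' := by
  unfold pvCell pvSetCell
  by_cases hi : i = i'
  · subst hi
    have hj : j ≠ j' := by tauto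
    by_cases hl : i < dp.length
    · rw [pvGetD_set_self _ _ _ _ hl, pvGetD_set_ne _ _ _ _ _ hj]
    · rw [List.set_eq_of_length_le (by omega)]
  · rw [pvGetD_set_ne _ _ _ _ _ hi]

-- --- pvD border values ---

theorem pvD_zero_right (l1 l2 : List Char) (i : Nat) : pvD l1 l2 i 0 = i := by
  cases i <;> simp [pvD]

theorem pvD_zero_left (l1 l2 : List Char) (j : Nat) : pvD l1 l2 0 j = j := by
  simp [pvD]

-- --- the invariant for A's fill ---

def pvGood (l1 l2 : List Char) (dp : List (List Nat)) (i j : Nat) : Prop :=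
  dp.length = l1.length + 1 ∧
  (∀ r, r ≤ l1.length → (dp.getD r []).length = l2.length + 1) ∧
  ∀ i' j', i' ≤ l1.length → j' ≤ l2.length →
    (i' < i ∨ j' = 0 ∨ (i' = i ∧ j' ≤ j)) → pvCell dp i' j' = pvD l1 l2 i' j'

-- --- structured views of A's table construction (definitionally equal to pvDpA's lets) ---

def pvDp1 (l1 l2 : List Char) (k : Nat) : List (List Nat) :=
  (List.range k).foldl (fun dp i => pvSetCell dp i 0 i)
    (List.replicate (l1.length+1) (List.replicate (l2.length+1) 0))

def pvDp2 (l1 l2 : List Char) (k : Nat) : List (List Nat) :=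
  (List.range k).foldl (fun dp j => pvSetCell dp 0 j j) (pvDp1 l1 l2 (l1.length+1))

def pvFillRow (l1 l2 : List Char) (i : Nat) (dp : List (List Nat)) (t : Nat) : List (List Nat) :=
  (List.range' 1 t).foldl (fun dp j =>
    if l1.getD (i-1) ' ' = l2.getD (j-1) ' ' then
      pvSetCell dp i j (pvCell dp (i-1) (j-1))
    else
      pvSetCell dp i j (1 + min (min (pvCell dp (i-1) j) (pvCell dp i (j-1))) (pvCell dp (i-1) (j-1)))) dp

def pvFillA (l1 l2 : List Char) (k : Nat) : List (List Nat) :=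
  (List.range' 1 k).foldl (fun dp i => pvFillRow l1 l2 i dp l2.length) (pvDp2 l1 l2 (l2.length+1))

theorem pvDpA_eq_fill (l1 l2 : List Char) : pvDpA l1 l2 = pvFillA l1 l2 l1.length := rfl

theorem pvDp1_char (l1 l2 : List Char) :
    ∀ k, k ≤ l1.length+1 →
      (pvDp1 l1 l2 k).length = l1.length+1 ∧
      (∀ r, r ≤ l1.length → ((pvDp1 l1 l2 k).getD r []).length = l2.length+1) ∧
      (∀ i, i < k → pvCell (pvDp1 l1 l2 k) i 0 = i) := by
  intro k
  induction k with
  | zero =>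
    intro _
    refine ⟨by simp [pvDp1], fun r hr => ?_, fun i hi => by omega⟩
    rw [pvDp1]
    simp only [List.range_zero, List.foldl_nil]
    rw [pvGetD_replicate _ _ _ _ (by omega)]
    simp
  | succ k ih =>
    intro hk
    obtain ⟨h1, h2, h3⟩ := ih (by omega)
    have hstep : pvDp1 l1 l2 (k+1) = pvSetCell (pvDp1 l1 l2 k) k 0 k := by
      simp only [pvDp1, List.range_succ, List.foldl_append, List.foldl_cons, List.foldl_nil]
    refine ⟨by rw [hstep, pvLen_setCell]; exact h1, fun r hr => ?_, fun i hi => ?_⟩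
    · rw [hstep, pvRowLen_setCell]; exact h2 r hr
    · by_cases hik : i = k
      · subst hik
        rw [hstep, pvCell_set_self _ _ _ _ (by omega) (by rw [h2 i (by omega)]; omega)]
      · rw [hstep, pvCell_set_ne _ _ _ _ _ _ (Or.inl (Ne.symm hik))]
        exact h3 i (by omega)

theorem pvDp2_char (l1 l2 : List Char) :
    ∀ k, k ≤ l2.length+1 →
      (pvDp2 l1 l2 k).length = l1.length+1 ∧
      (∀ r, r ≤ l1.length → ((pvDp2 l1 l2 k).getD r []).length = l2.length+1) ∧
      (∀ i, 1 ≤ i → i ≤ l1.length → pvCell (pvDp2 l1 l2 k) i 0 = i) ∧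
      (∀ j, j < k → pvCell (pvDp2 l1 l2 k) 0 j = j) := by
  intro k
  obtain ⟨g1, g2, g3⟩ := pvDp1_char l1 l2 (l1.length+1) le_rfl
  induction k with
  | zero =>
    intro _
    rw [pvDp2]
    simp only [List.range_zero, List.foldl_nil]
    exact ⟨g1, g2, fun i h1 h2 => g3 i (by omega), fun j hj => by omega⟩
  | succ k ih =>
    intro hk
    obtain ⟨h1, h2, h3, h4⟩ := ih (by omega)
    have hstep : pvDp2 l1 l2 (k+1) = pvSetCell (pvDp2 l1 l2 k) 0 k k := by
      simp only [pvDp2, List.range_succ, List.foldl_append, List.foldl_cons, List.foldl_nil]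
    refine ⟨by rw [hstep, pvLen_setCell]; exact h1, fun r hr => ?_, fun i hi1 hi2 => ?_, fun j hj => ?_⟩
    · rw [hstep, pvRowLen_setCell]; exact h2 r hr
    · rw [hstep, pvCell_set_ne _ _ _ _ _ _ (Or.inl (by omega))]
      exact h3 i hi1 hi2
    · by_cases hjk : j = k
      · subst hjk
        rw [hstep, pvCell_set_self _ _ _ _ (by omega) (by rw [h2 0 (by omega)]; omega)]
      · rw [hstep, pvCell_set_ne _ _ _ _ _ _ (Or.inr (Ne.symm hjk))]
        exact h4 j (by omega)

theorem pvBase_good (l1 l2 : List Char) : pvGood l1 l2 (pvDp2 l1 l2 (l2.length+1)) 0 l2.length := by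
  obtain ⟨h1, h2, h3, h4⟩ := pvDp2_char l1 l2 (l2.length+1) le_rfl
  refine ⟨h1, h2, fun i' j' hi hj hc => ?_⟩
  rcases hc with hc | hc | hc
  · omega
  · subst hc
    rcases Nat.eq_zero_or_pos i' with h | h
    · subst h
      rw [h4 0 (by omega), pvD_zero_left]
    · rw [h3 i' (by omega) hi, pvD_zero_right]
  · obtain ⟨rfl, hj'⟩ := hc
    rw [h4 j' (by omega), pvD_zero_left]

theorem pvFillRow_good (l1 l2 : List Char) (i0 : Nat) (hi : i0 + 1 ≤ l1.length)
    (dp : List (List Nat)) (hdp : pvGood l1 l2 dp (i0+1) 0) :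
    ∀ t, t ≤ l2.length → pvGood l1 l2 (pvFillRow l1 l2 (i0+1) dp t) (i0+1) t := by
  intro t
  induction t with
  | zero =>
    intro _
    rw [pvFillRow]
    simpa using hdp
  | succ t ih =>
    intro ht
    obtain ⟨h1, h2, h3⟩ := ih (by omega)
    have hstep : pvFillRow l1 l2 (i0+1) dp (t+1) =
        (if l1.getD (i0+1-1) ' ' = l2.getD (1+t-1) ' ' then
          pvSetCell (pvFillRow l1 l2 (i0+1) dp t) (i0+1) (1+t)
            (pvCell (pvFillRow l1 l2 (i0+1) dp t) (i0+1-1) (1+t-1))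
        else
          pvSetCell (pvFillRow l1 l2 (i0+1) dp t) (i0+1) (1+t)
            (1 + min (min (pvCell (pvFillRow l1 l2 (i0+1) dp t) (i0+1-1) (1+t))
                (pvCell (pvFillRow l1 l2 (i0+1) dp t) (i0+1) (1+t-1)))
              (pvCell (pvFillRow l1 l2 (i0+1) dp t) (i0+1-1) (1+t-1)))) := by
      simp only [pvFillRow, List.range'_1_concat, List.foldl_append, List.foldl_cons,
        List.foldl_nil]
    have e1 : i0 + 1 - 1 = i0 := by omega
    have e2 : 1 + t - 1 = t := by omega
    have e3 : 1 + t = t + 1 := by omega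
    rw [e1, e2, e3] at hstep
    -- the freshly written cell carries the value pvD (i0+1) (t+1)
    have hval : pvFillRow l1 l2 (i0+1) dp (t+1) =
        pvSetCell (pvFillRow l1 l2 (i0+1) dp t) (i0+1) (t+1) (pvD l1 l2 (i0+1) (t+1)) := by
      rw [hstep]
      by_cases hc : l1.getD i0 ' ' = l2.getD t ' '
      · rw [if_pos hc, h3 i0 t (by omega) (by omega) (Or.inl (by omega))]
        congr 1
        rw [pvD, if_pos hc]
      · rw [if_neg hc, h3 i0 t (by omega) (by omega) (Or.inl (by omega)),
          h3 i0 (t+1) (by omega) (by omega) (Or.inl (by omega)),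
          h3 (i0+1) t hi (by omega) (Or.inr (Or.inr ⟨rfl, le_rfl⟩))]
        congr 1
        rw [pvD, if_neg hc]
    refine ⟨by rw [hval, pvLen_setCell]; exact h1, fun r hr => ?_, fun i' j' hi' hj' hc => ?_⟩
    · rw [hval, pvRowLen_setCell]; exact h2 r hr
    · by_cases heq : i' = i0+1 ∧ j' = t+1
      · rw [heq.1, heq.2, hval,
          pvCell_set_self _ _ _ _ (by omega) (by rw [h2 (i0+1) (by omega)]; omega)]
      · rw [hval, pvCell_set_ne _ _ _ _ _ _ (by tauto)]
        refine h3 i' j' hi' hj' ?_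
        rcases hc with h | h | h
        · exact Or.inl h
        · exact Or.inr (Or.inl h)
        · obtain ⟨rfl, hle⟩ := h
          refine Or.inr (Or.inr ⟨rfl, ?_⟩)
          omega

theorem pvFillA_good (l1 l2 : List Char) :
    ∀ k, k ≤ l1.length → pvGood l1 l2 (pvFillA l1 l2 k) k l2.length := by
  intro k
  induction k with
  | zero =>
    intro _
    rw [pvFillA]
    simp only [List.range'_zero, List.foldl_nil]
    exact pvBase_good l1 l2
  | succ k ih =>
    intro hk
    have hstep : pvFillA l1 l2 (k+1) = pvFillRow l1 l2 (k+1) (pvFillA l1 l2 k) l2.length := by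
      simp only [pvFillA, List.range'_1_concat, List.foldl_append, List.foldl_cons,
        List.foldl_nil, show 1 + k = k + 1 from by omega]
    rw [hstep]
    obtain ⟨h1, h2, h3⟩ := ih (by omega)
    refine pvFillRow_good l1 l2 k hk (pvFillA l1 l2 k) ⟨h1, h2, fun i' j' hi hj hc => ?_⟩
      l2.length le_rfl
    refine h3 i' j' hi hj ?_
    rcases hc with h | h | h
    · rcases Nat.lt_succ_iff_lt_or_eq.mp h with h' | h'
      · exact Or.inl h'
      · subst h'; exact Or.inr (Or.inr ⟨rfl, hj⟩)
    · exact Or.inr (Or.inl h)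
    · obtain ⟨rfl, hle⟩ := h
      exact Or.inr (Or.inl (by omega))

theorem pvDpA_cell (l1 l2 : List Char) (i j : Nat) (hi : i ≤ l1.length) (hj : j ≤ l2.length) :
    pvCell (pvDpA l1 l2) i j = pvD l1 l2 i j := by
  rw [pvDpA_eq_fill]
  obtain ⟨h1, h2, h3⟩ := pvFillA_good l1 l2 l1.length le_rfl
  refine h3 i j hi hj ?_
  rcases Nat.lt_or_ge i l1.length with h | h
  · exact Or.inl h
  · exact Or.inr (Or.inr ⟨by omega, hj⟩)

-- --- A's backtrack equals the trace ---

theorem pvBtA_eq (l1 l2 : List Char) (dp : List (List Nat))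
    (hdp : ∀ i j, i ≤ l1.length → j ≤ l2.length → pvCell dp i j = pvD l1 l2 i j) :
    ∀ fuel i j acc, i ≤ l1.length → j ≤ l2.length → i + j ≤ fuel →
      pvBtA l1 l2 dp fuel i j acc = acc ++ pvTrace l1 l2 i j := by
  intro fuel
  induction fuel with
  | zero =>
    intro i j acc hi hj hf
    have : i = 0 ∧ j = 0 := by omega
    obtain ⟨rfl, rfl⟩ := this
    simp [pvBtA, pvTrace]
  | succ fuel ih =>
    intro i j acc hi hj hf
    match i, j with
    | 0, 0 => simp [pvBtA, pvTrace]
    | i0+1, 0 =>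
      rw [pvBtA, if_pos (by omega : i0+1 > 0 ∨ 0 > 0),
        if_neg (by rintro ⟨-, h, -⟩; omega :
          ¬ (i0+1 > 0 ∧ 0 > 0 ∧ (l1.getD (i0+1-1) ' ' = l2.getD (0-1) ' ' ∨
              pvCell dp (i0+1) 0 = pvCell dp (i0+1-1) (0-1) + 1))),
        if_pos]
      · rw [ih _ _ _ (by omega) hj (by omega), pvTrace]
        simp
      · refine ⟨by omega, ?_⟩
        simp only [Nat.add_sub_cancel]
        rw [hdp (i0+1) 0 hi hj, hdp i0 0 (by omega) hj, pvD_zero_right, pvD_zero_right]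
    | 0, j0+1 =>
      rw [pvBtA, if_pos (by omega : 0 > 0 ∨ j0+1 > 0),
        if_neg (by rintro ⟨h, -⟩; omega :
          ¬ (0 > 0 ∧ j0+1 > 0 ∧ (l1.getD (0-1) ' ' = l2.getD (j0+1-1) ' ' ∨
              pvCell dp 0 (j0+1) = pvCell dp (0-1) (j0+1-1) + 1))),
        if_neg (by rintro ⟨h, -⟩; omega :
          ¬ (0 > 0 ∧ pvCell dp 0 (j0+1) = pvCell dp (0-1) (j0+1) + 1))]
      rw [ih _ _ _ hi (by omega) (by omega), pvTrace]
      simp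
    | i0+1, j0+1 =>
      rw [pvBtA, if_pos (by omega : i0+1 > 0 ∨ j0+1 > 0)]
      simp only [Nat.add_sub_cancel]
      rw [hdp (i0+1) (j0+1) hi hj, hdp i0 j0 (by omega) (by omega),
        hdp i0 (j0+1) (by omega) hj]
      by_cases hD : l1.getD i0 ' ' = l2.getD j0 ' ' ∨ pvD l1 l2 (i0+1) (j0+1) = pvD l1 l2 i0 j0 + 1
      · rw [if_pos ⟨by omega, by omega, hD⟩, ih _ _ _ (by omega) (by omega) (by omega),
          pvTrace, if_pos hD]
        simp
      · rw [if_neg (by rintro ⟨-, -, h⟩; exact hD h)]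
        by_cases hU : pvD l1 l2 (i0+1) (j0+1) = pvD l1 l2 i0 (j0+1) + 1
        · rw [if_pos ⟨by omega, hU⟩, ih _ _ _ (by omega) hj (by omega),
            pvTrace, if_neg hD, if_pos hU]
          simp
        · rw [if_neg (by rintro ⟨-, h⟩; exact hU h), ih _ _ _ hi (by omega) (by omega),
            pvTrace, if_neg hD, if_neg hU]
          simp

-- --- B's fill characterization ---

def pvRead (ptr : List (List Char)) (i j : Nat) : Char := (ptr.getD i []).getD j 'L'

def pvPtrGood (l1 l2 : List Char) (ptr : List (List Char)) : Prop :=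
  (∀ j, pvRead ptr 0 j = 'L') ∧
  (∀ i j, 1 ≤ i → i ≤ l1.length → j ≤ l2.length → pvRead ptr i j = pvMove l1 l2 i j)

-- --- structured views of B's fill (definitionally equal to pvFillB's lets) ---

def pvInnerB (l1 l2 : List Char) (i : Nat) (prev : List Nat) (cp : List Nat × List Char)
    (t : Nat) : List Nat × List Char :=
  (List.range' 1 t).foldl (fun cp j =>
    let cur := cp.1
    let prow := cp.2
    if l1.getD (i-1) ' ' = l2.getD (j-1) ' ' then
      (cur.set j (prev.getD (j-1) 0), prow.set j 'D')
    else
      let v := 1 + min (min (prev.getD j 0) (cur.getD (j-1) 0)) (prev.getD (j-1) 0)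
      let prow' := if v = prev.getD (j-1) 0 + 1 then prow.set j 'D'
                   else if v = prev.getD j 0 + 1 then prow.set j 'U'
                   else prow.set j 'L'
      (cur.set j v, prow')) cp

def pvOuterB (l1 l2 : List Char) (k : Nat) : List Nat × List (List Char) :=
  (List.range' 1 k).foldl (fun st i =>
    let prev := st.1
    let ptr := st.2
    let prow0 := (ptr.getD i []).set 0 'U'
    let cur0 := i :: List.replicate l2.length 0
    let inner := pvInnerB l1 l2 i prev (cur0, prow0) l2.length
    (inner.1, ptr.set i inner.2))
    (List.range (l2.length+1), List.replicate (l1.length+1) (List.replicate (l2.length+1) 'L'))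

theorem pvFillB_eq_outer (l1 l2 : List Char) : pvFillB l1 l2 = pvOuterB l1 l2 l1.length := rfl

def pvRowGood (l1 l2 : List Char) (i : Nat) (cp : List Nat × List Char) (t : Nat) : Prop :=
  cp.1.length = l2.length+1 ∧ (∀ j, j ≤ t → cp.1.getD j 0 = pvD l1 l2 i j) ∧
  cp.2.length = l2.length+1 ∧ (∀ j, j ≤ t → cp.2.getD j 'L' = pvMove l1 l2 i j)

theorem pvInnerB_good (l1 l2 : List Char) (i0 : Nat)
    (prev : List Nat)
    (hp : ∀ j, j ≤ l2.length → prev.getD j 0 = pvD l1 l2 i0 j)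
    (cp : List Nat × List Char) (h0 : pvRowGood l1 l2 (i0+1) cp 0) :
    ∀ t, t ≤ l2.length → pvRowGood l1 l2 (i0+1) (pvInnerB l1 l2 (i0+1) prev cp t) t := by
  intro t
  induction t with
  | zero =>
    intro _
    rw [pvInnerB]
    simpa using h0
  | succ t ih =>
    intro ht
    obtain ⟨h1, h2, h3, h4⟩ := ih (by omega)
    set cpt := pvInnerB l1 l2 (i0+1) prev cp t with hcpt
    have hstep : pvInnerB l1 l2 (i0+1) prev cp (t+1) =
        (if l1.getD (i0+1-1) ' ' = l2.getD (1+t-1) ' ' then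
          (cpt.1.set (1+t) (prev.getD (1+t-1) 0), cpt.2.set (1+t) 'D')
        else
          (cpt.1.set (1+t) (1 + min (min (prev.getD (1+t) 0) (cpt.1.getD (1+t-1) 0)) (prev.getD (1+t-1) 0)),
           if 1 + min (min (prev.getD (1+t) 0) (cpt.1.getD (1+t-1) 0)) (prev.getD (1+t-1) 0) = prev.getD (1+t-1) 0 + 1 then cpt.2.set (1+t) 'D'
           else if 1 + min (min (prev.getD (1+t) 0) (cpt.1.getD (1+t-1) 0)) (prev.getD (1+t-1) 0) = prev.getD (1+t) 0 + 1 then cpt.2.set (1+t) 'U'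
           else cpt.2.set (1+t) 'L')) := by
      rw [hcpt]
      simp only [pvInnerB, List.range'_1_concat, List.foldl_append, List.foldl_cons,
        List.foldl_nil]
    have e1 : i0 + 1 - 1 = i0 := by omega
    have e2 : 1 + t - 1 = t := by omega
    have e3 : 1 + t = t + 1 := by omega
    rw [e1, e2, e3] at hstep
    rw [hp t (by omega), hp (t+1) (by omega), h2 t (by omega)] at hstep
    constructor
    · rw [hstep]
      split_ifs <;> simp [h1]
    constructor
    · intro j hj
      by_cases hjt : j = t + 1
      · subst hjt
        rw [hstep]
        by_cases hc : l1.getD i0 ' ' = l2.getD t ' '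
        · rw [if_pos hc]
          show (cpt.1.set (t+1) (pvD l1 l2 i0 t)).getD (t+1) 0 = _
          rw [pvGetD_set_self _ _ _ _ (by omega), pvD, if_pos hc]
        · rw [if_neg hc]
          show (cpt.1.set (t+1) _).getD (t+1) 0 = _
          rw [pvGetD_set_self _ _ _ _ (by omega)]
          rw [pvD, if_neg hc]
      · have : (pvInnerB l1 l2 (i0+1) prev cp (t+1)).1.getD j 0 = cpt.1.getD j 0 := by
          rw [hstep]
          by_cases hc : l1.getD i0 ' ' = l2.getD t ' '
          · rw [if_pos hc]
            exact pvGetD_set_ne _ _ _ _ _ (by omega)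
          · rw [if_neg hc]
            exact pvGetD_set_ne _ _ _ _ _ (by omega)
        rw [this]
        exact h2 j (by omega)
    constructor
    · rw [hstep]
      split_ifs <;> simp [h3]
    · intro j hj
      by_cases hjt : j = t + 1
      · subst hjt
        rw [hstep]
        by_cases hc : l1.getD i0 ' ' = l2.getD t ' '
        · rw [if_pos hc]
          show (cpt.2.set (t+1) 'D').getD (t+1) 'L' = _
          rw [pvGetD_set_self _ _ _ _ (by omega), pvMove, if_pos hc]
        · rw [if_neg hc]
          have hv : 1 + min (min (pvD l1 l2 i0 (t+1)) (pvD l1 l2 (i0+1) t)) (pvD l1 l2 i0 t) =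
              pvD l1 l2 (i0+1) (t+1) := by
            rw [pvD, if_neg hc]
          rw [hv]
          by_cases hd : pvD l1 l2 (i0+1) (t+1) = pvD l1 l2 i0 t + 1
          · rw [if_pos hd]
            show (cpt.2.set (t+1) 'D').getD (t+1) 'L' = _
            rw [pvGetD_set_self _ _ _ _ (by omega), pvMove, if_neg hc, if_pos hd]
          · rw [if_neg hd]
            by_cases hu : pvD l1 l2 (i0+1) (t+1) = pvD l1 l2 i0 (t+1) + 1
            · rw [if_pos hu]
              show (cpt.2.set (t+1) 'U').getD (t+1) 'L' = _
              rw [pvGetD_set_self _ _ _ _ (by omega), pvMove, if_neg hc, if_neg hd, if_pos hu]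
            · rw [if_neg hu]
              show (cpt.2.set (t+1) 'L').getD (t+1) 'L' = _
              rw [pvGetD_set_self _ _ _ _ (by omega), pvMove, if_neg hc, if_neg hd, if_neg hu]
      · have : (pvInnerB l1 l2 (i0+1) prev cp (t+1)).2.getD j 'L' = cpt.2.getD j 'L' := by
          rw [hstep]
          by_cases hc : l1.getD i0 ' ' = l2.getD t ' '
          · rw [if_pos hc]
            exact pvGetD_set_ne _ _ _ _ _ (by omega)
          · rw [if_neg hc]
            split_ifs <;> exact pvGetD_set_ne _ _ _ _ _ (by omega)
        rw [this]
        exact h4 j (by omega)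

def pvStGood (l1 l2 : List Char) (st : List Nat × List (List Char)) (k : Nat) : Prop :=
  st.1.length = l2.length+1 ∧ (∀ j, j ≤ l2.length → st.1.getD j 0 = pvD l1 l2 k j) ∧
  st.2.length = l1.length+1 ∧
  (∀ i j, 1 ≤ i → i ≤ k → j ≤ l2.length → pvRead st.2 i j = pvMove l1 l2 i j) ∧
  (∀ i, i ≤ l1.length → (k < i ∨ i = 0) → st.2.getD i [] = List.replicate (l2.length+1) 'L')

theorem pvOuterB_good (l1 l2 : List Char) :
    ∀ k, k ≤ l1.length → pvStGood l1 l2 (pvOuterB l1 l2 k) k := by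
  intro k
  induction k with
  | zero =>
    intro _
    rw [pvOuterB]
    simp only [List.range'_zero, List.foldl_nil]
    refine ⟨by simp, fun j hj => ?_, by simp, fun i j h1 h2 _ => by omega, fun i hi _ => ?_⟩
    · rw [pvGetD_range _ _ (by omega), pvD_zero_left]
    · exact pvGetD_replicate _ _ _ _ (by omega)
  | succ k ih =>
    intro hk
    obtain ⟨h1, h2, h3, h4, h5⟩ := ih (by omega)
    set stk := pvOuterB l1 l2 k with hstk
    have hrow0 : stk.2.getD (k+1) [] = List.replicate (l2.length+1) 'L' :=
      h5 (k+1) hk (Or.inl (by omega))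
    have hstep : pvOuterB l1 l2 (k+1) =
        ((pvInnerB l1 l2 (k+1) stk.1
            ((k+1) :: List.replicate l2.length 0, (stk.2.getD (k+1) []).set 0 'U') l2.length).1,
          stk.2.set (k+1)
            (pvInnerB l1 l2 (k+1) stk.1
              ((k+1) :: List.replicate l2.length 0, (stk.2.getD (k+1) []).set 0 'U') l2.length).2) := by
      rw [hstk]
      simp only [pvOuterB, List.range'_1_concat, List.foldl_append, List.foldl_cons,
        List.foldl_nil, show 1 + k = k + 1 from by omega]
    have hcur0 : ∀ j, j ≤ 0 → (((k+1) :: List.replicate l2.length 0) : List Nat).getD j 0 =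
        pvD l1 l2 (k+1) j := by
      intro j hj
      have hj0 : j = 0 := by omega
      subst hj0
      rw [pvD_zero_right]
      rfl
    have hprow0 : ∀ j, j ≤ 0 → ((stk.2.getD (k+1) []).set 0 'U').getD j 'L' =
        pvMove l1 l2 (k+1) j := by
      intro j hj
      have hj0 : j = 0 := by omega
      subst hj0
      rw [pvGetD_set_self _ _ _ _ (by rw [hrow0]; simp)]
      rfl
    have hinner := pvInnerB_good l1 l2 k stk.1 h2
      ((k+1) :: List.replicate l2.length 0, (stk.2.getD (k+1) []).set 0 'U')
      ⟨by simp, hcur0, by rw [hrow0]; simp, hprow0⟩ l2.length le_rfl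
    obtain ⟨g1, g2, g3, g4⟩ := hinner
    refine ⟨by rw [hstep]; exact g1, fun j hj => by rw [hstep]; exact g2 j hj,
      by rw [hstep]; simp [h3], fun i j hi1 hi2 hj => ?_, fun i hi hki => ?_⟩
    · by_cases hik : i = k+1
      · subst hik
        rw [hstep]
        show ((stk.2.set (k+1) _).getD (k+1) []).getD j 'L' = _
        rw [pvGetD_set_self _ _ _ _ (by omega)]
        exact g4 j hj
      · rw [hstep]
        show ((stk.2.set (k+1) _).getD i []).getD j 'L' = _
        rw [pvGetD_set_ne _ _ _ _ _ (by omega)]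
        exact h4 i j hi1 (by omega) hj
    · rw [hstep]
      show (stk.2.set (k+1) _).getD i [] = _
      rw [pvGetD_set_ne _ _ _ _ _ (by omega)]
      exact h5 i hi (by omega)

theorem pvFillB_ptr (l1 l2 : List Char) : pvPtrGood l1 l2 (pvFillB l1 l2).2 := by
  obtain ⟨h1, h2, h3, h4, h5⟩ := pvOuterB_good l1 l2 l1.length le_rfl
  rw [pvFillB_eq_outer]
  refine ⟨fun j => ?_, fun i j hi1 hi2 hj => h4 i j hi1 hi2 hj⟩
  rw [pvRead, h5 0 (by omega) (Or.inr rfl)]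
  by_cases hj : j < l2.length+1
  · exact pvGetD_replicate _ _ _ _ hj
  · rw [List.getD_eq_getElem?_getD, List.getElem?_eq_none (by simp; omega)]
    rfl

-- --- B's walk equals the filtered trace ---

theorem pvWalkB_step (l1 l2 : List Char) (ptr : List (List Char)) (fuel i j : Nat)
    (acc : List (String × String)) (h : i > 0 ∨ j > 0) :
    pvWalkB l1 l2 ptr (fuel+1) i j acc =
      (if (ptr.getD i []).getD j 'L' = 'D' then
        pvWalkB l1 l2 ptr fuel (i-1) (j-1)
          (acc ++ [(String.ofList [l1.getD (i-1) ' '], String.ofList [l2.getD (j-1) ' '])])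
      else if (ptr.getD i []).getD j 'L' = 'U' then
        pvWalkB l1 l2 ptr fuel (i-1) j acc
      else
        pvWalkB l1 l2 ptr fuel i (j-1) acc) := by
  rw [pvWalkB, if_pos h]

theorem pvWalkB_eq (l1 l2 : List Char) (ptr : List (List Char)) (hptr : pvPtrGood l1 l2 ptr) :
    ∀ fuel i j acc, i ≤ l1.length → j ≤ l2.length → i + j ≤ fuel →
      pvWalkB l1 l2 ptr fuel i j acc =
        acc ++ (pvTrace l1 l2 i j).filter (fun p => decide (p.1 ≠ "" ∧ p.2 ≠ "")) := by
  obtain ⟨h0, hrow⟩ := hptr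
  intro fuel
  induction fuel with
  | zero =>
    intro i j acc hi hj hf
    have : i = 0 ∧ j = 0 := by omega
    obtain ⟨rfl, rfl⟩ := this
    simp [pvWalkB, pvTrace]
  | succ fuel ih =>
    intro i j acc hi hj hf
    match i, j with
    | 0, 0 => simp [pvWalkB, pvTrace]
    | i0+1, 0 =>
      have hm : (ptr.getD (i0+1) []).getD 0 'L' = 'U' := by
        have := hrow (i0+1) 0 (by omega) hi hj
        rw [pvRead] at this
        rw [this]
        rfl
      rw [pvWalkB_step l1 l2 ptr fuel (i0+1) 0 acc (by omega), hm,
        if_neg (show ('U' : Char) ≠ 'D' by decide), if_pos rfl]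
      simp only [Nat.add_sub_cancel]
      rw [ih i0 0 acc (by omega) hj (by omega), pvTrace]
      simp
    | 0, j0+1 =>
      have hm : (ptr.getD 0 []).getD (j0+1) 'L' = 'L' := by
        have := h0 (j0+1)
        rw [pvRead] at this
        exact this
      rw [pvWalkB_step l1 l2 ptr fuel 0 (j0+1) acc (by omega), hm,
        if_neg (show ('L' : Char) ≠ 'D' by decide), if_neg (show ('L' : Char) ≠ 'U' by decide)]
      simp only [Nat.add_sub_cancel]
      rw [ih 0 j0 acc hi (by omega) (by omega), pvTrace]
      simp
    | i0+1, j0+1 =>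
      have hm : (ptr.getD (i0+1) []).getD (j0+1) 'L' = pvMove l1 l2 (i0+1) (j0+1) := by
        have := hrow (i0+1) (j0+1) (by omega) hi hj
        rw [pvRead] at this
        exact this
      by_cases hD : l1.getD i0 ' ' = l2.getD j0 ' ' ∨ pvD l1 l2 (i0+1) (j0+1) = pvD l1 l2 i0 j0 + 1
      · have hmv : pvMove l1 l2 (i0+1) (j0+1) = 'D' := by
          rw [pvMove]
          rcases hD with h | h
          · rw [if_pos h]
          · by_cases hc : l1.getD i0 ' ' = l2.getD j0 ' '
            · rw [if_pos hc]
            · rw [if_neg hc, if_pos h]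
        rw [hmv] at hm
        rw [pvWalkB_step l1 l2 ptr fuel (i0+1) (j0+1) acc (by omega), hm, if_pos rfl]
        simp only [Nat.add_sub_cancel]
        rw [ih i0 j0 _ (by omega) (by omega) (by omega), pvTrace, if_pos hD]
        simp
      · rw [not_or] at hD
        obtain ⟨hc, hd⟩ := hD
        by_cases hU : pvD l1 l2 (i0+1) (j0+1) = pvD l1 l2 i0 (j0+1) + 1
        · have hmv : pvMove l1 l2 (i0+1) (j0+1) = 'U' := by
            rw [pvMove, if_neg hc, if_neg hd, if_pos hU]
          rw [hmv] at hm
          rw [pvWalkB_step l1 l2 ptr fuel (i0+1) (j0+1) acc (by omega), hm,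
            if_neg (show ('U' : Char) ≠ 'D' by decide), if_pos rfl]
          simp only [Nat.add_sub_cancel]
          rw [ih i0 (j0+1) acc (by omega) hj (by omega), pvTrace,
            if_neg (not_or.mpr ⟨hc, hd⟩), if_pos hU]
          simp
        · have hmv : pvMove l1 l2 (i0+1) (j0+1) = 'L' := by
            rw [pvMove, if_neg hc, if_neg hd, if_neg hU]
          rw [hmv] at hm
          rw [pvWalkB_step l1 l2 ptr fuel (i0+1) (j0+1) acc (by omega), hm,
            if_neg (show ('L' : Char) ≠ 'D' by decide), if_neg (show ('L' : Char) ≠ 'U' by decide)]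
          simp only [Nat.add_sub_cancel]
          rw [ih (i0+1) j0 acc hi (by omega) (by omega), pvTrace,
            if_neg (not_or.mpr ⟨hc, hd⟩), if_neg hU]
          simp

-- ===== VERDICT (by name: the statement is the Claim_ definition above) =====
theorem align_strings_py_spec : Claim_equal_align_strings_py := by
  unfold Claim_equal_align_strings_py Spec_align_strings_py
  intro s1 s2 _
  simp only [align_strings_py, align_strings_py_alt]
  by_cases h : s1.toList.length = s2.toList.length
  · rw [if_pos h, if_pos h]
  · rw [if_neg h, if_neg h]
    rw [pvBtA_eq s1.toList s2.toList (pvDpA s1.toList s2.toList)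
      (fun i j hi hj => pvDpA_cell s1.toList s2.toList i j hi hj) _ _ _ [] le_rfl le_rfl le_rfl]
    rw [pvWalkB_eq s1.toList s2.toList (pvFillB s1.toList s2.toList).2
      (pvFillB_ptr s1.toList s2.toList) _ _ _ [] le_rfl le_rfl le_rfl]
    simp [List.filter_reverse]
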